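-- pv_equiv track=rewrite | github.com/christine-M9/codility2 | app2/python.py | solution
-- ===== SOURCE A (Python) =====
-- def solution(S):
--     count = 0
--     n = len(S)
--
-- # Check if the first character is the same as the last character
--     if S[0] == S[-1]:
--         count += 1
--
-- # Convert the string to a list for efficient splicing
--     S = list(S)
--
--     for i in range(n-1):
-- # Move the first character to the end
--         S.append(S.pop(0))
--
-- # Check if the first character is the same as the last character
--         if S[0] == S[-1]:
--             count += 1
--
--     return count
-- ===== SOURCE B (Python) =====
-- def solution(S):
--     # single pass: count positions i where S[i] equals its cyclic predecessor
--     # (S[i-1]; for i == 0 Python's negative indexing gives the last character)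
--     return sum(1 for i in range(len(S)) if S[i] == S[i - 1])
-- ===== Notes on version B (the rewrite author's own statement) =====
-- stated objective: faster
-- what changed: B replaces A's n-1 physical rotations (each a pop(0)+append with a first/last comparison) by a single pass that compares S[i] with S[i-1] for every index, using Python's negative indexing for the wrap-around pair.
import Mathlib
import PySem

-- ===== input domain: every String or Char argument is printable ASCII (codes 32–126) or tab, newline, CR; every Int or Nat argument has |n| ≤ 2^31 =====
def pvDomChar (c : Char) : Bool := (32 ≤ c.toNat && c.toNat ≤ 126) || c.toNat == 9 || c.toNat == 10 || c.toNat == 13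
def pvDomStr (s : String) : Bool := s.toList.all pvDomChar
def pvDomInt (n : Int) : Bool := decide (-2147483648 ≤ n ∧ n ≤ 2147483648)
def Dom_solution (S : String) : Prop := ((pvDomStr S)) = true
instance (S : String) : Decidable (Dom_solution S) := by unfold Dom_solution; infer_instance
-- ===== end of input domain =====

-- B counts each cyclically-adjacent equal pair in one pass instead of A's n-1 rotations: asymptotically faster (O(n) vs O(n^2)).

-- ===== PORT A =====
-- A's for-loop: each iteration pops the first element, appends it, and compares first with last.
def aLoop (k : Nat) (count : Int) (lst : List Char) : Int :=
  match k with
  | 0 => count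
  | k + 1 =>
    match PySem.List.pop? lst 0 with
    | none => count  -- unreachable: the list is nonempty on every admitted input
    | some (h, rest) =>
      let lst' := rest ++ [h]
      aLoop k (if PySem.List.pyGet? lst' 0 = PySem.List.pyGet? lst' (-1) then count + 1 else count) lst'

def solution (S : String) : Int :=
  let L := S.toList
  let count : Int := if PySem.List.pyGet? L 0 = PySem.List.pyGet? L (-1) then 1 else 0
  aLoop (L.length - 1) count L

-- ===== PORT B =====
def solution_alt (S : String) : Int :=
  (PySem.List.pyRange 0 (S.toList.length : Int) 1).foldl
    (fun acc i =>
      if PySem.List.pyGet? S.toList i = PySem.List.pyGet? S.toList (i - 1) then acc + 1 else acc) 0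

-- ===== PRECONDITION & SPEC =====
-- A raises IndexError at S[0] on the empty string; Pre_ excludes exactly that input.
def Pre_solution (S : String) : Prop := S.toList ≠ []
instance (S : String) : Decidable (Pre_solution S) := by unfold Pre_solution; infer_instance
def pvWitness_solution : String := "ab"

def Spec_solution (S : String) (out : Int) : Prop := out = solution_alt S
instance (S : String) (out : Int) : Decidable (Spec_solution S out) := by unfold Spec_solution; infer_instance

-- ===== CLAIM (what is proved, stated in full; the proofs are below) =====
def Claim_equal_solution : Prop := ∀ (S : String), Dom_solution S → Pre_solution S → Spec_solution S (solution S)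

-- ===== LEMMAS AND PROOFS =====

-- Sum of [L[j+t+1] = L[j+t]] for t = 0 .. k-1 (the common value both ports compute).
def pairSum (L : List Char) : Nat → Nat → Int
  | _, 0 => 0
  | j, k + 1 => (if L.getD (j + 1) 'a' = L.getD j 'a' then (1 : Int) else 0) + pairSum L (j + 1) k

theorem aLoop_rot (L : List Char) :
    ∀ (k j : Nat) (c : Int), j + k + 1 ≤ L.length →
      aLoop k c (L.drop j ++ L.take j) = c + pairSum L j k := by
  intro k
  induction k with
  | zero => intro j c h; simp [aLoop, pairSum]
  | succ k ih =>
    intro j c h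
    have hj : j < L.length := by omega
    have hj1 : j + 1 < L.length := by omega
    have hdrop : L.drop j = L[j] :: L.drop (j + 1) := List.drop_eq_getElem_cons hj
    have hdrop1 : L.drop (j + 1) = L[j + 1] :: L.drop (j + 2) := List.drop_eq_getElem_cons hj1
    have htake : L.take (j + 1) = L.take j ++ [L[j]] := by
      rw [List.take_add_one]; simp [hj]
    rw [hdrop]
    simp only [aLoop, List.cons_append, PySem.List.pop?_zero_cons]
    have hre : (L.drop (j + 1) ++ L.take j) ++ [L[j]] = L.drop (j + 1) ++ L.take (j + 1) := by
      rw [htake, List.append_assoc]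
    have hget0 : PySem.List.pyGet? ((L.drop (j + 1) ++ L.take j) ++ [L[j]]) 0
        = some L[j + 1] := by
      rw [List.append_assoc, hdrop1, List.cons_append]
      exact PySem.List.pyGet?_zero_cons _ _
    have hgetm1 : PySem.List.pyGet? ((L.drop (j + 1) ++ L.take j) ++ [L[j]]) (-1)
        = some L[j] := PySem.List.pyGet?_neg_one_append_singleton _ _
    rw [hget0, hgetm1, hre, ih (j + 1) _ (by omega)]
    simp only [Option.some.injEq]
    have hp : pairSum L j (k + 1)
        = (if L[j + 1] = L[j] then (1 : Int) else 0) + pairSum L (j + 1) k := by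
      rw [pairSum, List.getD_eq_getElem L 'a' hj1, List.getD_eq_getElem L 'a' hj]
    rw [hp]
    split_ifs with hc <;> ring

theorem bFold (L : List Char) :
    ∀ (k j : Nat) (acc : Int), j + k = L.length → 1 ≤ j →
      (PySem.List.pyRange (j : Int) (L.length : Int) 1).foldl
        (fun acc i => if PySem.List.pyGet? L i = PySem.List.pyGet? L (i - 1) then acc + 1 else acc) acc
      = acc + pairSum L (j - 1) k := by
  intro k
  induction k with
  | zero =>
    intro j acc h hj
    rw [PySem.List.pyRange_one_eq_nil (by omega)]
    simp [pairSum]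
  | succ k ih =>
    intro j acc h hj
    have hjn : j < L.length := by omega
    rw [PySem.List.pyRange_one_cons (by exact_mod_cast hjn)]
    simp only [List.foldl_cons]
    have hg1 : PySem.List.pyGet? L (j : Int) = some L[j] :=
      PySem.List.pyGet?_ofNat L j hjn
    have hcast : (j : Int) - 1 = ((j - 1 : Nat) : Int) := by omega
    have hg2 : PySem.List.pyGet? L ((j : Int) - 1) = some L[j - 1] := by
      rw [hcast]; exact PySem.List.pyGet?_ofNat L (j - 1) (by omega)
    have hstep : ((j : Int) + 1) = (((j + 1 : Nat)) : Int) := by omega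
    rw [hg1, hg2, hstep, ih (j + 1) _ (by omega) (by omega)]
    simp only [Option.some.injEq]
    have hp : pairSum L (j - 1) (k + 1)
        = (if L[j] = L[j - 1] then (1 : Int) else 0) + pairSum L j k := by
      have hjj : j - 1 + 1 = j := by omega
      rw [pairSum, hjj, List.getD_eq_getElem L 'a' hjn, List.getD_eq_getElem L 'a' (by omega)]
    have hjj2 : j + 1 - 1 = j := by omega
    rw [hjj2] at *
    rw [hp]
    split_ifs with hc <;> ring

-- ===== VERDICT (by name: the statement is the Claim_ definition above) =====
theorem solution_spec : Claim_equal_solution := by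
  intro S _ hpre
  unfold Spec_solution solution solution_alt
  set L := S.toList with hL
  have hn : 1 ≤ L.length := by
    cases hLc : L with
    | nil => exact absurd hLc hpre
    | cons a t => simp
  -- B side: peel off i = 0
  rw [PySem.List.pyRange_one_cons (by exact_mod_cast hn)]
  simp only [List.foldl_cons]
  have h01 : (0 : Int) - 1 = -1 := by norm_num
  rw [h01]
  rw [show ((0 : Int) + 1) = ((1 : Nat) : Int) from by norm_num]
  rw [bFold L (L.length - 1) 1 _ (by omega) (by omega)]
  -- A side
  have hA : aLoop (L.length - 1) (if PySem.List.pyGet? L 0 = PySem.List.pyGet? L (-1) then (1:Int) else 0) L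
      = (if PySem.List.pyGet? L 0 = PySem.List.pyGet? L (-1) then (1:Int) else 0) + pairSum L 0 (L.length - 1) := by
    have := aLoop_rot L (L.length - 1) 0 (if PySem.List.pyGet? L 0 = PySem.List.pyGet? L (-1) then (1:Int) else 0) (by omega)
    simpa using this
  rw [hA]
  split_ifs <;> ring
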